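-- pv_equiv track=rewrite | github.com/SantiagoSanchezF/mgnify-pipelines-toolkit | mgnify_pipelines_toolkit/analysis/amplicon/amplicon_utils.py | build_mcp_cons_dict_list
-- ===== SOURCE A (Python) =====
-- from collections import defaultdict, Counter
--
-- def build_mcp_cons_dict_list(mcp_count_dict, mcp_len):
--     """
--     Generate list of dictionaries of base conservation for mcp output (mcp_cons_list)
--     e.g. [{'A':0.9, 'C':0.1}, {'T':1.0}, ....] for every base position
--     """
--
--     mcp_cons_list = []
--
--     for i in range(mcp_len):
--         index_base_dict = defaultdict(int)
--         for mcp in mcp_count_dict.keys():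
--             if len(mcp) < mcp_len:
--                 continue
--             base = mcp[i]
--             index_base_dict[base] += mcp_count_dict[mcp]
--         mcp_cons_list.append(index_base_dict)
--
--     return mcp_cons_list
-- ===== SOURCE B (Python) =====
-- from collections import defaultdict
--
--
-- def build_mcp_cons_dict_list(mcp_count_dict, mcp_len):
--     """
--     Generate list of dictionaries of base conservation for mcp output (mcp_cons_list)
--     in a single pass over mcp_count_dict instead of one scan per position.
--     """
--
--     mcp_cons_list = [defaultdict(int) for _ in range(mcp_len)]
--
--     for mcp, count in mcp_count_dict.items():
--         if len(mcp) >= mcp_len: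
--             for index_base_dict, base in zip(mcp_cons_list, mcp):
--                 index_base_dict[base] += count
--
--     return mcp_cons_list
-- ===== Notes on version B (the rewrite author's own statement) =====
-- stated objective: alternative
-- what changed: Loop interchange: instead of one scan of the key set per position (with a dict lookup per key per position), B pre-allocates the per-position defaultdicts and fills them all in one pass over mcp_count_dict.items(), zipping each surviving kmer's characters with the position dicts.
import Mathlib
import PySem

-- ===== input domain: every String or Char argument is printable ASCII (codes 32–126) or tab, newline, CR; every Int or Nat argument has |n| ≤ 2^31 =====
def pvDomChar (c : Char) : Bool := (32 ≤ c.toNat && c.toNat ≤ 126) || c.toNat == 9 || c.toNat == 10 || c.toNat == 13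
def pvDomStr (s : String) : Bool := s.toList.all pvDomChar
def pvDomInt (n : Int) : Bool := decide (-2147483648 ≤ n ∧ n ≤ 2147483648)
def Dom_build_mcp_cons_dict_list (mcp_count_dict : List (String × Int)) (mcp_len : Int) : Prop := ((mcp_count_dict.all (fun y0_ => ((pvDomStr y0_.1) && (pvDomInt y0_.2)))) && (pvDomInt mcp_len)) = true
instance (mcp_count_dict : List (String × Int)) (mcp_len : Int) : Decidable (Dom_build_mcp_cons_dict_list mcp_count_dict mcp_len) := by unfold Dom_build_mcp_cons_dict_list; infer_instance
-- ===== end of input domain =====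

-- B replaces A's per-position scans of the key set by a single pass over the items that
-- fills all position dicts at once (loop interchange); equality of the return value is proved below.

-- ===== PORT A =====
-- literal port of A: for i in range(mcp_len): scan the dict's keys, skip short kmers,
-- index_base_dict[mcp[i]] += mcp_count_dict[mcp]  (defaultdict(int) → Dict.modify with default 0;
-- mcp[i] never raises here since the guard ensures i < len(mcp), so pyGet?'s `none` branch is dead: "";
-- mcp_count_dict[mcp] always hits since mcp comes from keys(), so Dict.getD's default 0 is dead too)
def build_mcp_cons_dict_list (mcp_count_dict : List (String × Int)) (mcp_len : Int) : List (List (String × Int)) :=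
  ((PySem.List.pyRange 0 mcp_len 1).foldl (fun mcp_cons_list i =>
      mcp_cons_list ++ [(PySem.Dict.ofList mcp_count_dict).keys.foldl (fun index_base_dict mcp =>
          if PySem.Str.len mcp < mcp_len then index_base_dict
          else
            index_base_dict.modify (match PySem.Str.pyGet? mcp i with
              | some c => String.ofList [c]
              | none => "") 0 (· + (PySem.Dict.ofList mcp_count_dict).getD mcp 0))
        PySem.Dict.empty]) []).map (·.items)

-- ===== PORT B =====
-- literal port of Source B: pre-allocate one empty dict per position, one pass over the dict's items,
-- zip(mcp_cons_list, mcp) updates every position dict of a surviving kmer at once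
def build_mcp_cons_dict_list_alt (mcp_count_dict : List (String × Int)) (mcp_len : Int) : List (List (String × Int)) :=
  ((PySem.Dict.ofList mcp_count_dict).items.foldl (fun mcp_cons_list p =>
      if mcp_len ≤ PySem.Str.len p.1 then
        List.zipWith (fun index_base_dict c => index_base_dict.modify (String.ofList [c]) 0 (· + p.2))
          mcp_cons_list p.1.toList
      else mcp_cons_list)
    ((PySem.List.pyRange 0 mcp_len 1).map (fun _ => PySem.Dict.empty))).map (·.items)

-- ===== PRECONDITION & SPEC =====
def Spec_build_mcp_cons_dict_list (mcp_count_dict : List (String × Int)) (mcp_len : Int) (out : List (List (String × Int))) : Prop := out = build_mcp_cons_dict_list_alt mcp_count_dict mcp_len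
instance (mcp_count_dict : List (String × Int)) (mcp_len : Int) (out : List (List (String × Int))) : Decidable (Spec_build_mcp_cons_dict_list mcp_count_dict mcp_len out) := by unfold Spec_build_mcp_cons_dict_list; infer_instance

-- ===== CLAIM (what is proved, stated in full; the proofs are below) =====
def Claim_equal_build_mcp_cons_dict_list : Prop := ∀ (mcp_count_dict : List (String × Int)) (mcp_len : Int), Dom_build_mcp_cons_dict_list mcp_count_dict mcp_len → Spec_build_mcp_cons_dict_list mcp_count_dict mcp_len (build_mcp_cons_dict_list mcp_count_dict mcp_len)

-- ===== LEMMAS AND PROOFS =====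

-- the per-position update a single item contributes (B's zip step seen column-wise)
def pvCellStep (n : Int) (j : Nat) (dd : PySem.Dict String Int) (p : String × Int) : PySem.Dict String Int :=
  if n ≤ PySem.Str.len p.1 then dd.modify (String.ofList [p.1.toList.getD j ' ']) 0 (· + p.2) else dd

-- when the state is empty, B's one-pass fold stays empty (covers mcp_len ≤ 0)
theorem pv_foldl_nil_state (n : Int) (items : List (String × Int)) :
    items.foldl (fun mcp_cons_list (p : String × Int) =>
        if n ≤ PySem.Str.len p.1 then
          List.zipWith (fun (index_base_dict : PySem.Dict String Int) c =>
            index_base_dict.modify (String.ofList [c]) 0 (· + p.2)) mcp_cons_list p.1.toList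
        else mcp_cons_list) [] = [] := by
  induction items with
  | nil => rfl
  | cons p items ih =>
    rw [List.foldl_cons]
    split
    · rw [List.zipWith_nil_left]; exact ih
    · exact ih

-- B's one-pass fold over a list-of-dicts state equals the independent per-cell folds (loop interchange)
theorem pv_interchange (n : Int) (items : List (String × Int)) :
    ∀ (st : List (PySem.Dict String Int)), (st.length : Int) ≤ n →
      items.foldl (fun mcp_cons_list p =>
          if n ≤ PySem.Str.len p.1 then
            List.zipWith (fun index_base_dict c =>
              index_base_dict.modify (String.ofList [c]) 0 (· + p.2)) mcp_cons_list p.1.toList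
          else mcp_cons_list) st
      = st.mapIdx (fun j dd => items.foldl (pvCellStep n j) dd) := by
  induction items with
  | nil =>
    intro st _
    rw [List.foldl_nil]
    apply List.ext_getElem <;> simp
  | cons p items ih =>
    intro st hst
    rw [List.foldl_cons]
    by_cases hp : n ≤ PySem.Str.len p.1
    · have hchars : st.length ≤ p.1.toList.length := by
        have h1 := PySem.Str.len_eq p.1
        have h2 : p.1.toList.length = p.1.length := by simp
        omega
      have hlen : (List.zipWith (fun index_base_dict c =>
          index_base_dict.modify (String.ofList [c]) 0 (· + p.2)) st p.1.toList).length = st.length := by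
        simp only [List.length_zipWith]; omega
      rw [if_pos hp, ih _ (by rw [hlen]; exact hst)]
      apply List.ext_getElem
      · simp [hlen]
      · intro k h1 h2
        simp only [List.getElem_mapIdx, List.foldl_cons]
        congr 1
        have hk : k < st.length := by
          have := h1; simp only [List.length_mapIdx, hlen] at this; exact this
        have hk2 : k < p.1.toList.length := lt_of_lt_of_le hk hchars
        simp only [List.getElem_zipWith]
        unfold pvCellStep
        rw [if_pos hp, List.getD_eq_getElem _ _ hk2]
    · rw [if_neg hp, ih _ hst]
      apply List.ext_getElem
      · simp
      · intro k h1 h2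
        simp only [List.getElem_mapIdx, List.foldl_cons]
        congr 1
        unfold pvCellStep
        rw [if_neg hp]

-- A's per-position scan over d.keys, rewritten as a scan over d.items (the lookup returns the stored value)
theorem pv_col (l : List (String × Int)) (n i : Int) :
    (PySem.Dict.ofList l).keys.foldl (fun index_base_dict mcp =>
        if PySem.Str.len mcp < n then index_base_dict
        else
          index_base_dict.modify (match PySem.Str.pyGet? mcp i with
            | some c => String.ofList [c]
            | none => "") 0 (· + (PySem.Dict.ofList l).getD mcp 0)) PySem.Dict.empty
    = (PySem.Dict.ofList l).items.foldl (fun index_base_dict p =>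
        if PySem.Str.len p.1 < n then index_base_dict
        else
          index_base_dict.modify (match PySem.Str.pyGet? p.1 i with
            | some c => String.ofList [c]
            | none => "") 0 (· + p.2)) PySem.Dict.empty := by
  rw [show (PySem.Dict.ofList l).keys = (PySem.Dict.ofList l).items.map (·.1) from rfl, List.foldl_map]
  apply PySem.List.foldl_congr_mem
  intro acc p hp
  have hv : (PySem.Dict.ofList l).getD p.1 0 = p.2 :=
    PySem.Dict.getD_of_mem_items _ (by simpa using hp) (PySem.Dict.nodup_keys_ofList l) 0
  rw [hv]

-- at a position k < n, the column of B's pass equals A's per-position scan over the items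
theorem pv_cell_col (items : List (String × Int)) (n : Int) (k : Nat) (hk : (k : Int) < n) :
    items.foldl (pvCellStep n k) PySem.Dict.empty
    = items.foldl (fun index_base_dict p =>
        if PySem.Str.len p.1 < n then index_base_dict
        else
          index_base_dict.modify (match PySem.Str.pyGet? p.1 (k : Int) with
            | some c => String.ofList [c]
            | none => "") 0 (· + p.2)) PySem.Dict.empty := by
  apply PySem.List.foldl_congr_mem
  intro acc p _
  unfold pvCellStep
  by_cases hp : n ≤ PySem.Str.len p.1
  · rw [if_pos hp, if_neg (not_lt.mpr hp)]
    have hkl : k < p.1.toList.length := by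
      have h1 := PySem.Str.len_eq p.1
      have h2 : p.1.toList.length = p.1.length := by simp
      omega
    have hget : PySem.Str.pyGet? p.1 (k : Int) = some p.1.toList[k] := by
      show PySem.Chars.pyGet? p.1.toList (k : Int) = _
      rw [PySem.Chars.pyGet?_eq_listPyGet?, PySem.List.pyGet?_natCast,
        List.getElem?_eq_getElem hkl]
    rw [hget, List.getD_eq_getElem _ _ hkl]
  · rw [if_neg hp, if_pos (not_le.mp hp)]

-- ===== VERDICT (by name: the statement is the Claim_ definition above) =====
theorem build_mcp_cons_dict_list_spec : Claim_equal_build_mcp_cons_dict_list := by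
  intro l n _
  unfold Spec_build_mcp_cons_dict_list build_mcp_cons_dict_list build_mcp_cons_dict_list_alt
  rw [PySem.List.foldl_append_singleton_eq_map]
  by_cases h : 0 < n
  case neg =>
    have h' : n ≤ 0 := by omega
    have hr : PySem.List.pyRange 0 n 1 = [] := by
      simp [PySem.List.pyRange, h]
    rw [hr]
    simp only [List.map_nil, List.nil_append]
    rw [pv_foldl_nil_state]
    rfl
  case pos =>
    have hn : ((n.toNat : Int)) = n := Int.toNat_of_nonneg h.le
    rw [← hn, PySem.List.pyRange_zero_natCast]
    rw [pv_interchange _ _ _ (by simp)]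
    apply List.ext_getElem
    · simp
    · intro k h1 h2
      simp only [List.nil_append, List.getElem_map, List.getElem_mapIdx, List.getElem_range]
      congr 1
      have hk : (k : Int) < (n.toNat : Int) := by
        have hkN : k < n.toNat := by simpa using h1
        exact_mod_cast hkN
      rw [pv_col, ← pv_cell_col _ _ _ hk]
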